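-- pv_equiv track=rewrite | github.com/gwonihan/TIL | Algorithm/스터디/프로그래머스/level2/방문 길이.py | solution
-- ===== SOURCE A (Python) =====
-- def solution(dirs):
--     answer = 0
--     li_2 = [[0 for i in range(11)] for i in range(11)]
--     x, y = 5, 5
--     li_2[x][y] = 1
--
--     for i in dirs:
--         if i == 'U':
--             x -= 1
--             if x < 0:
--                 x += 1
--             else:
--                 li_2[x][y] += 1
--
--         elif i == 'L':
--             y -= 1
--             if y < 0:
--                 y += 1
--             else:
--                 li_2[x][y] += 1
--
--         elif i == 'R':
--             y += 1
--             if y > 9: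
--                 y -= 1
--             else:
--                 li_2[x][y] += 1
--
--         elif i == 'D':
--             x += 1
--             if x > 9:
--                 x -= 1
--             else:
--                 li_2[x][y] += 1
--
--
--     for i in li_2:
--         for j in i:
--             if j == 1:
--                 answer += 1
--
--
--     return answer
-- ===== SOURCE B (Python) =====
-- def solution(dirs):
--     counts = {(5, 5): 1}
--     ans = 1
--     x, y = 5, 5
--     for c in dirs:
--         if c == 'U':
--             nx, ny = x - 1, y
--         elif c == 'L':
--             nx, ny = x, y - 1
--         elif c == 'R':
--             nx, ny = x, y + 1
--         elif c == 'D':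
--             nx, ny = x + 1, y
--         else:
--             continue
--         if 0 <= nx <= 9 and 0 <= ny <= 9:
--             x, y = nx, ny
--             n = counts.get((x, y), 0) + 1
--             counts[(x, y)] = n
--             if n == 1:
--                 ans += 1
--             elif n == 2:
--                 ans -= 1
--     return ans
-- ===== Notes on version B (the rewrite author's own statement) =====
-- stated objective: alternative
-- what changed: Replaced the 11x11 grid with a per-step final scan by an incremental answer: a dict of (x,y)->visit counts is updated on each valid move and the answer is adjusted in place (+1 when a cell reaches count 1, -1 when it reaches 2), so no grid is allocated and no second pass over 121 cells happens.
import Mathlib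
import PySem

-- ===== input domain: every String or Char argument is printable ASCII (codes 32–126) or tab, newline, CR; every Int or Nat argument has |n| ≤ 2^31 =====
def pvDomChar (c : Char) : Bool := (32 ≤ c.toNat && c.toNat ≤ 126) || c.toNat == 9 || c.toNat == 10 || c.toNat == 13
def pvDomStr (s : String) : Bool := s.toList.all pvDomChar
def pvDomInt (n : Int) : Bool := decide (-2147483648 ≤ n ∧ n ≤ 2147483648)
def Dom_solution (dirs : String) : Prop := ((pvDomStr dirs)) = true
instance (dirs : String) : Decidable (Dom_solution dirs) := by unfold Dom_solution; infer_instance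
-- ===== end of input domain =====

-- B replaces A's 11x11 grid plus final 121-cell scan by an incremental answer kept
-- alongside a dict of visit counts (alternative decomposition, same single walk).

-- ===== PORT A =====
-- li_2[x][y] += 1 (indices are guarded nonnegative and < 11 in A, so Nat indexing is exact)
def gridModify (g : List (List Int)) (x y : Nat) : List (List Int) :=
  g.set x ((g.getD x []).set y (((g.getD x []).getD y 0) + 1))

-- li_2[x][y] = v
def gridSet (g : List (List Int)) (x y : Nat) (v : Int) : List (List Int) :=
  g.set x ((g.getD x []).set y v)

-- one iteration of A's for-loop, branches in source order
def stepA (st : Int × Int × List (List Int)) (c : Char) : Int × Int × List (List Int) :=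
  let (x, y, g) := st
  if c = 'U' then
    let x := x - 1
    if x < 0 then (x + 1, y, g) else (x, y, gridModify g x.toNat y.toNat)
  else if c = 'L' then
    let y := y - 1
    if y < 0 then (x, y + 1, g) else (x, y, gridModify g x.toNat y.toNat)
  else if c = 'R' then
    let y := y + 1
    if y > 9 then (x, y - 1, g) else (x, y, gridModify g x.toNat y.toNat)
  else if c = 'D' then
    let x := x + 1
    if x > 9 then (x - 1, y, g) else (x, y, gridModify g x.toNat y.toNat)
  else st

-- A's final double loop: for i in li_2: for j in i: if j == 1: answer += 1
def countAns (g : List (List Int)) : Int :=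
  g.foldl (fun a row => row.foldl (fun a j => if j = 1 then a + 1 else a) a) 0

def solution (dirs : String) : Int :=
  let g0 : List (List Int) := (List.range 11).map (fun _ => (List.range 11).map (fun _ => (0 : Int)))
  let g1 := gridSet g0 5 5 1
  let s := dirs.toList.foldl stepA (5, 5, g1)
  countAns s.2.2

-- ===== PORT B =====
-- one iteration of B's loop: candidate cell, bounds check, incremental answer update
def stepB (st : Int × Int × PySem.Dict (Int × Int) Int × Int) (c : Char) :
    Int × Int × PySem.Dict (Int × Int) Int × Int :=
  let (x, y, counts, ans) := st
  match (if c = 'U' then some (x - 1, y)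
         else if c = 'L' then some (x, y - 1)
         else if c = 'R' then some (x, y + 1)
         else if c = 'D' then some (x + 1, y)
         else none) with
  | none => st
  | some (nx, ny) =>
    if 0 ≤ nx ∧ nx ≤ 9 ∧ 0 ≤ ny ∧ ny ≤ 9 then
      let n := counts.getD (nx, ny) 0 + 1
      (nx, ny, counts.insert (nx, ny) n,
       if n = 1 then ans + 1 else if n = 2 then ans - 1 else ans)
    else st

def solution_alt (dirs : String) : Int :=
  (dirs.toList.foldl stepB (5, 5, PySem.Dict.empty.insert (5, 5) 1, 1)).2.2.2

-- ===== PRECONDITION & SPEC =====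
def Spec_solution (dirs : String) (out : Int) : Prop := out = solution_alt dirs
instance (dirs : String) (out : Int) : Decidable (Spec_solution dirs out) := by unfold Spec_solution; infer_instance

-- ===== CLAIM (what is proved, stated in full; the proofs are below) =====
def Claim_equal_solution : Prop := ∀ (dirs : String), Dom_solution dirs → Spec_solution dirs (solution dirs)

-- ===== LEMMAS AND PROOFS =====

-- the grid A maintains, reconstructed from B's dict of visit counts
def buildGrid (d : PySem.Dict (Int × Int) Int) : List (List Int) :=
  (List.range 11).map (fun (i : Nat) =>
    (List.range 11).map (fun (j : Nat) => d.getD ((i : Int), (j : Int)) 0))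

-- simulation relation between A's and B's loop states
def R (a : Int × Int × List (List Int)) (b : Int × Int × PySem.Dict (Int × Int) Int × Int) : Prop :=
  a.1 = b.1 ∧ a.2.1 = b.2.1 ∧ 0 ≤ a.1 ∧ a.1 ≤ 9 ∧ 0 ≤ a.2.1 ∧ a.2.1 ≤ 9 ∧
    a.2.2 = buildGrid b.2.2.1 ∧ b.2.2.2 = countAns a.2.2

theorem getD_map_range {α : Type} (f : Nat → α) (n k : Nat) (hk : k < n) (dflt : α) :
    ((List.range n).map f).getD k dflt = f k := by
  simp [List.getD_eq_getElem?_getD, hk]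

theorem set_map_range {α : Type} (f : Nat → α) (n k : Nat) (v : α) :
    ((List.range n).map f).set k v = (List.range n).map (fun m => if m = k then v else f m) := by
  apply List.ext_getElem
  · simp
  · intro m h1 h2
    simp only [List.getElem_set, List.getElem_map, List.getElem_range]
    simp only [List.length_set, List.length_map, List.length_range] at h1
    by_cases hm : m = k <;> simp [hm]
    exact fun hkm => (hm hkm.symm).elim

theorem map_range_congr {α : Type} (f g : Nat → α) (n : Nat) (h : ∀ m < n, f m = g m) :
    (List.range n).map f = (List.range n).map g := by
  apply List.map_congr_left
  intro m hm
  exact h m (List.mem_range.mp hm)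

theorem grid_upd (d : PySem.Dict (Int × Int) Int) (i j : Nat) (hi : i < 11) (hj : j < 11) :
    gridModify (buildGrid d) i j
      = buildGrid (d.insert ((i : Int), (j : Int)) (d.getD ((i : Int), (j : Int)) 0 + 1)) := by
  unfold gridModify buildGrid
  rw [getD_map_range _ 11 i hi, getD_map_range _ 11 j hj, set_map_range _ 11 j,
    set_map_range _ 11 i]
  apply map_range_congr
  intro r hr
  by_cases hri : r = i
  · subst hri
    rw [if_pos rfl]
    apply map_range_congr
    intro m hm
    by_cases hmj : m = j
    · subst hmj
      simp
    · simp [PySem.Dict.getD_insert, Prod.mk.injEq, hmj]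
  · simp only [if_neg hri]
    apply map_range_congr
    intro m hm
    simp [PySem.Dict.getD_insert, Prod.mk.injEq, hri]

theorem sum_update (F G : Nat → Int) (n k : Nat) (hk : k < n) (h : ∀ m < n, m ≠ k → F m = G m) :
    ((List.range n).map F).sum = ((List.range n).map G).sum + F k - G k := by
  induction n with
  | zero => omega
  | succ n ih =>
    rw [List.range_succ]
    simp only [List.map_append, List.sum_append, List.map_cons, List.map_nil, List.sum_cons,
      List.sum_nil]
    by_cases hkn : k = n
    · subst hkn
      have : (List.range k).map F = (List.range k).map G :=
        map_range_congr _ _ _ (fun m hm => h m (by omega) (by omega))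
      rw [this]; ring
    · have hlast : F n = G n := h n (by omega) (fun e => hkn e.symm)
      have := ih (by omega) (fun m hm hmk => h m (by omega) hmk)
      omega

theorem countP_update (q q' : Nat → Bool) (n k : Nat) (hk : k < n)
    (h : ∀ m < n, m ≠ k → q m = q' m) :
    ((List.range n).countP q : Int) = ((List.range n).countP q' : Int)
      + (if q k then 1 else 0) - (if q' k then 1 else 0) := by
  induction n with
  | zero => omega
  | succ n ih =>
    rw [List.range_succ]
    simp only [List.countP_append, List.countP_cons, List.countP_nil]
    by_cases hkn : k = n
    · subst hkn
      have : (List.range k).countP q = (List.range k).countP q' :=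
        List.countP_congr (fun m hm => by
          rw [h m (by simpa using (List.mem_range.mp hm).trans (Nat.lt_succ_self k))]
          · exact (List.mem_range.mp hm).ne)
      rw [this]
      push_cast
      split_ifs <;> simp_all
    · have hlast : q n = q' n := h n (by omega) (fun e => hkn e.symm)
      have := ih (by omega) (fun m hm hmk => h m (by omega) hmk)
      push_cast at this ⊢
      rw [hlast]
      split_ifs at this ⊢ <;> simp_all

theorem countAns_eq (g : List (List Int)) :
    countAns g = (g.map (fun row => ((row.countP (fun v => decide (v = 1)) : Nat) : Int))).sum := by
  unfold countAns
  have h1 : ∀ (a : Int) (row : List Int), row ∈ g →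
      row.foldl (fun a j => if j = 1 then a + 1 else a) a
        = a + ((row.countP (fun v => decide (v = 1)) : Nat) : Int) := by
    intro a row _
    exact PySem.List.foldl_ite_add_one (fun j => j = 1) row a
  rw [PySem.List.foldl_congr_mem g _
    (fun (a : Int) (row : List Int) => a + ((row.countP (fun v => decide (v = 1)) : Nat) : Int))
    0 h1, PySem.List.foldl_add]
  simp

theorem double_update (f f' : Nat → Nat → Int) (i j : Nat) (hi : i < 11) (hj : j < 11)
    (hoff : ∀ r m, r < 11 → m < 11 → ¬(r = i ∧ m = j) → f r m = f' r m) :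
    countAns ((List.range 11).map (fun r => (List.range 11).map (fun m => f r m)))
      = countAns ((List.range 11).map (fun r => (List.range 11).map (fun m => f' r m)))
        + (if f i j = 1 then 1 else 0) - (if f' i j = 1 then 1 else 0) := by
  rw [countAns_eq, countAns_eq]
  simp only [List.map_map, Function.comp_def, List.countP_map]
  have hF : ∀ r, r < 11 → r ≠ i →
      (((List.range 11).countP (fun m => decide (f r m = 1)) : Nat) : Int)
        = (((List.range 11).countP (fun m => decide (f' r m = 1)) : Nat) : Int) := by
    intro r hr hri
    congr 1
    apply List.countP_congr
    intro m hm
    simp [hoff r m hr (List.mem_range.mp hm) (fun hc => hri hc.1)]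
  rw [sum_update
    (fun r => (((List.range 11).countP (fun m => decide (f r m = 1)) : Nat) : Int))
    (fun r => (((List.range 11).countP (fun m => decide (f' r m = 1)) : Nat) : Int))
    11 i hi hF]
  have hrow := countP_update (fun m => decide (f i m = 1)) (fun m => decide (f' i m = 1))
    11 j hj (fun m hm hmj => by simp [hoff i m hi hm (fun hc => hmj hc.2)])
  simp only [decide_eq_true_eq] at hrow
  omega

theorem cnt_upd (d : PySem.Dict (Int × Int) Int) (i j : Nat) (hi : i < 11) (hj : j < 11) :
    countAns (buildGrid (d.insert ((i : Int), (j : Int)) (d.getD ((i : Int), (j : Int)) 0 + 1)))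
      = (if d.getD ((i : Int), (j : Int)) 0 + 1 = 1 then countAns (buildGrid d) + 1
         else if d.getD ((i : Int), (j : Int)) 0 + 1 = 2 then countAns (buildGrid d) - 1
         else countAns (buildGrid d)) := by
  unfold buildGrid
  have hoff : ∀ r m : Nat, r < 11 → m < 11 → ¬(r = i ∧ m = j) →
      (d.insert ((i : Int), (j : Int)) (d.getD ((i : Int), (j : Int)) 0 + 1)).getD
          ((r : Int), (m : Int)) 0
        = d.getD ((r : Int), (m : Int)) 0 := by
    intro r m _ _ hrm
    rw [PySem.Dict.getD_insert, if_neg (by simp only [Prod.mk.injEq, Int.natCast_inj]; exact hrm)]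
  have key := double_update
    (fun r m => (d.insert ((i : Int), (j : Int)) (d.getD ((i : Int), (j : Int)) 0 + 1)).getD
      ((r : Int), (m : Int)) 0)
    (fun r m => d.getD ((r : Int), (m : Int)) 0) i j hi hj hoff
  simp only [PySem.Dict.getD_insert_self] at key
  rw [key]
  split_ifs <;> omega

theorem move_ok (d : PySem.Dict (Int × Int) Int) (g : List (List Int)) (ans nx ny : Int)
    (hg : g = buildGrid d) (hans : ans = countAns g)
    (h0 : 0 ≤ nx) (h9 : nx ≤ 9) (k0 : 0 ≤ ny) (k9 : ny ≤ 9) :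
    gridModify g nx.toNat ny.toNat = buildGrid (d.insert (nx, ny) (d.getD (nx, ny) 0 + 1)) ∧
    (if d.getD (nx, ny) 0 + 1 = 1 then ans + 1
     else if d.getD (nx, ny) 0 + 1 = 2 then ans - 1 else ans)
      = countAns (gridModify g nx.toNat ny.toNat) := by
  obtain ⟨i, rfl⟩ : ∃ i : Nat, nx = (i : Int) := ⟨nx.toNat, by omega⟩
  obtain ⟨j, rfl⟩ : ∃ j : Nat, ny = (j : Int) := ⟨ny.toNat, by omega⟩
  have hi : i < 11 := by omega
  have hj : j < 11 := by omega
  subst hg hans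
  simp only [Int.toNat_natCast]
  refine ⟨grid_upd d i j hi hj, ?_⟩
  rw [grid_upd d i j hi hj, cnt_upd d i j hi hj]

theorem R_mk (x y : Int) (g : List (List Int)) (x' y' : Int) (d : PySem.Dict (Int × Int) Int)
    (ans : Int) (h1 : x = x') (h2 : y = y') (h3 : 0 ≤ x) (h4 : x ≤ 9) (h5 : 0 ≤ y) (h6 : y ≤ 9)
    (h7 : g = buildGrid d) (h8 : ans = countAns g) : R (x, y, g) (x', y', d, ans) :=
  ⟨h1, h2, h3, h4, h5, h6, h7, h8⟩

theorem step_R (a : Int × Int × List (List Int)) (b : Int × Int × PySem.Dict (Int × Int) Int × Int)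
    (c : Char) (h : R a b) : R (stepA a c) (stepB b c) := by
  obtain ⟨x, y, g⟩ := a
  obtain ⟨x', y', d, ans⟩ := b
  obtain ⟨hx, hy, h0, h9, k0, k9, hg, hans⟩ := h
  simp only at hx hy h0 h9 k0 k9 hg hans
  subst hx hy
  by_cases hU : c = 'U'
  · subst hU
    simp only [stepA, stepB, Char.reduceEq, reduceIte]
    by_cases hb : x - 1 < 0
    · rw [if_pos hb, if_neg (by omega : ¬(0 ≤ x - 1 ∧ x - 1 ≤ 9 ∧ 0 ≤ y ∧ y ≤ 9))]
      exact R_mk _ _ _ _ _ _ _ (by omega) rfl (by omega) (by omega) k0 k9 hg hans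
    · rw [if_neg hb, if_pos (by omega : 0 ≤ x - 1 ∧ x - 1 ≤ 9 ∧ 0 ≤ y ∧ y ≤ 9)]
      obtain ⟨hgm, hcnt⟩ := move_ok d g ans (x - 1) y hg hans (by omega) (by omega) k0 k9
      exact R_mk _ _ _ _ _ _ _ rfl rfl (by omega) (by omega) k0 k9 hgm hcnt
  · by_cases hL : c = 'L'
    · subst hL
      simp only [stepA, stepB, Char.reduceEq, reduceIte]
      by_cases hb : y - 1 < 0
      · rw [if_pos hb, if_neg (by omega : ¬(0 ≤ x ∧ x ≤ 9 ∧ 0 ≤ y - 1 ∧ y - 1 ≤ 9))]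
        exact R_mk _ _ _ _ _ _ _ rfl (by omega) h0 h9 (by omega) (by omega) hg hans
      · rw [if_neg hb, if_pos (by omega : 0 ≤ x ∧ x ≤ 9 ∧ 0 ≤ y - 1 ∧ y - 1 ≤ 9)]
        obtain ⟨hgm, hcnt⟩ := move_ok d g ans x (y - 1) hg hans h0 h9 (by omega) (by omega)
        exact R_mk _ _ _ _ _ _ _ rfl rfl h0 h9 (by omega) (by omega) hgm hcnt
    · by_cases hR : c = 'R'
      · subst hR
        simp only [stepA, stepB, Char.reduceEq, reduceIte]
        by_cases hb : y + 1 > 9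
        · rw [if_pos hb, if_neg (by omega : ¬(0 ≤ x ∧ x ≤ 9 ∧ 0 ≤ y + 1 ∧ y + 1 ≤ 9))]
          exact R_mk _ _ _ _ _ _ _ rfl (by omega) h0 h9 (by omega) (by omega) hg hans
        · rw [if_neg hb, if_pos (by omega : 0 ≤ x ∧ x ≤ 9 ∧ 0 ≤ y + 1 ∧ y + 1 ≤ 9)]
          obtain ⟨hgm, hcnt⟩ := move_ok d g ans x (y + 1) hg hans h0 h9 (by omega) (by omega)
          exact R_mk _ _ _ _ _ _ _ rfl rfl h0 h9 (by omega) (by omega) hgm hcnt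
      · by_cases hD : c = 'D'
        · subst hD
          simp only [stepA, stepB, Char.reduceEq, reduceIte]
          by_cases hb : x + 1 > 9
          · rw [if_pos hb, if_neg (by omega : ¬(0 ≤ x + 1 ∧ x + 1 ≤ 9 ∧ 0 ≤ y ∧ y ≤ 9))]
            exact R_mk _ _ _ _ _ _ _ (by omega) rfl (by omega) (by omega) k0 k9 hg hans
          · rw [if_neg hb, if_pos (by omega : 0 ≤ x + 1 ∧ x + 1 ≤ 9 ∧ 0 ≤ y ∧ y ≤ 9)]
            obtain ⟨hgm, hcnt⟩ := move_ok d g ans (x + 1) y hg hans (by omega) (by omega) k0 k9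
            exact R_mk _ _ _ _ _ _ _ rfl rfl (by omega) (by omega) k0 k9 hgm hcnt
        · simp only [stepA, stepB, if_neg hU, if_neg hL, if_neg hR, if_neg hD]
          exact R_mk _ _ _ _ _ _ _ rfl rfl h0 h9 k0 k9 hg hans

theorem foldl_R (l : List Char) (a : Int × Int × List (List Int))
    (b : Int × Int × PySem.Dict (Int × Int) Int × Int) (h : R a b) :
    R (l.foldl stepA a) (l.foldl stepB b) := by
  induction l generalizing a b with
  | nil => exact h
  | cons c l ih => exact ih _ _ (step_R a b c h)

theorem R_init :
    R (5, 5, gridSet ((List.range 11).map (fun _ => (List.range 11).map (fun _ => (0 : Int)))) 5 5 1)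
      (5, 5, PySem.Dict.empty.insert (5, 5) 1, 1) := by
  refine ⟨rfl, rfl, by norm_num, by norm_num, by norm_num, by norm_num, by decide, by decide⟩

-- ===== VERDICT (by name: the statement is the Claim_ definition above) =====
theorem solution_spec : Claim_equal_solution := by
  intro dirs _
  unfold Spec_solution solution solution_alt
  have h := foldl_R dirs.toList _ _ R_init
  exact (h.2.2.2.2.2.2.2).symm
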